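-- pv_equiv track=rewrite | github.com/lpoups/maxicourses-ovh | www/maxicoursesapp/api/scraper.py | is_bot_protection
-- ===== SOURCE A (Python) =====
-- def is_bot_protection(html: str) -> bool:
--     """
--     Détecte des pages de protection anti-bot (Akamai/BotManager/Distil/Incapsula/Cloudflare, etc.)
--     Retourne True si la page ressemble à une barrière anti-bot.
--     """
--     try:
--         low = (html or "").lower()
--     except Exception:
--         return False
--     markers = [
--         "captcha-delivery.com",
--         "enable javascript",
--         "please enable javascript",
--         "pardon the interruption",
--         "access denied",
--         "request unsuccessful",
--         "are you a human",
--         "distil_r_captcha",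
--         "akamai",
--         "bot detection",
--         "cf-chl-bypass",
--         "cloudflare",
--         "unusual traffic",
--         "one more step",
--         "/cdn-cgi/challenge-platform",
--     ]
--     return any(m in low for m in markers)
-- ===== SOURCE B (Python) =====
-- import re
--
-- _MARKERS = [
--     "captcha-delivery.com",
--     "enable javascript",
--     "please enable javascript",
--     "pardon the interruption",
--     "access denied",
--     "request unsuccessful",
--     "are you a human",
--     "distil_r_captcha",
--     "akamai",
--     "bot detection",
--     "cf-chl-bypass",
--     "cloudflare",
--     "unusual traffic",
--     "one more step",
--     "/cdn-cgi/challenge-platform",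
-- ]
-- _BOT_RE = re.compile("|".join(re.escape(m) for m in _MARKERS))
--
--
-- def is_bot_protection(html: str) -> bool:
--     try:
--         low = (html or "").lower()
--     except Exception:
--         return False
--     return bool(_BOT_RE.search(low))
-- ===== Notes on version B (the rewrite author's own statement) =====
-- stated objective: idiomatic
-- what changed: Replaces the per-marker loop of k separate substring searches with one module-level compiled alternation regex that makes a single left-to-right scan of the lowercased HTML, trying every marker at each position; not claimed faster.
import Mathlib
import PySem

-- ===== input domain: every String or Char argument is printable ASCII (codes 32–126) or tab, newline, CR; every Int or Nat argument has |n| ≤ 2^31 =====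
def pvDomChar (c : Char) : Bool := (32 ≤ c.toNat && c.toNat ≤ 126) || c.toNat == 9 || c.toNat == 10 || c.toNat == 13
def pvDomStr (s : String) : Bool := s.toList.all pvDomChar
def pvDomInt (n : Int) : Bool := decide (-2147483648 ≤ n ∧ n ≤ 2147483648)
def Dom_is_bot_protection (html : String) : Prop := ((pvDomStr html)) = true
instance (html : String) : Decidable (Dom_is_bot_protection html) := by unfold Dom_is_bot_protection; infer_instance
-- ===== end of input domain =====

-- B replaces the per-marker substring loop with a single combined scan (one pass over the
-- lowered HTML trying every marker at each position, like the compiled alternation regex in Source B).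

def pvMarkers : List String := [
  "captcha-delivery.com",
  "enable javascript",
  "please enable javascript",
  "pardon the interruption",
  "access denied",
  "request unsuccessful",
  "are you a human",
  "distil_r_captcha",
  "akamai",
  "bot detection",
  "cf-chl-bypass",
  "cloudflare",
  "unusual traffic",
  "one more step",
  "/cdn-cgi/challenge-platform"]

-- ===== PORT A =====
-- A: low = html.lower(); any(m in low for m in markers)  (k separate substring searches)
def is_bot_protection (html : String) : Bool :=
  let low := PySem.Str.lower html
  pvMarkers.any (fun m => PySem.Str.isIn m low)

-- ===== PORT B =====
-- B: one left-to-right scan; at each position try every marker as a prefix (the regex search)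
def pvBotScan (markers : List (List Char)) : List Char → Bool
  | [] => markers.any (fun m => m.isPrefixOf ([] : List Char))
  | c :: t => markers.any (fun m => m.isPrefixOf (c :: t)) || pvBotScan markers t

def is_bot_protection_alt (html : String) : Bool :=
  let low := PySem.Str.lower html
  pvBotScan (pvMarkers.map String.toList) low.toList

-- ===== PRECONDITION & SPEC =====
def Spec_is_bot_protection (html : String) (out : Bool) : Prop := out = is_bot_protection_alt html
instance (html : String) (out : Bool) : Decidable (Spec_is_bot_protection html out) := by unfold Spec_is_bot_protection; infer_instance

-- ===== CLAIM (what is proved, stated in full; the proofs are below) =====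
def Claim_equal_is_bot_protection : Prop := ∀ (html : String), Dom_is_bot_protection html → Spec_is_bot_protection html (is_bot_protection html)

-- ===== LEMMAS AND PROOFS =====

theorem pvBotScan_eq_any_isIn (markers : List (List Char)) (cs : List Char) :
    pvBotScan markers cs = markers.any (fun m => PySem.Chars.isIn m cs) := by
  induction cs with
  | nil =>
    simp only [pvBotScan]
    apply Bool.eq_iff_iff.mpr
    simp only [List.any_eq_true, List.isPrefixOf_iff_prefix,
      PySem.Chars.isIn_iff_infix, List.infix_iff_prefix_suffix]
    constructor
    · rintro ⟨m, hm, hp⟩; exact ⟨m, hm, [], hp, List.suffix_refl _⟩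
    · rintro ⟨m, hm, t, hp, hs⟩
      exact ⟨m, hm, by rw [List.suffix_nil.mp hs] at hp; exact hp⟩
  | cons c t ih =>
    simp only [pvBotScan, ih]
    apply Bool.eq_iff_iff.mpr
    simp only [Bool.or_eq_true, List.any_eq_true, List.isPrefixOf_iff_prefix,
      PySem.Chars.isIn_iff_infix, List.infix_cons_iff]
    constructor
    · rintro (⟨m, hm, hp⟩ | ⟨m, hm, hi⟩)
      · exact ⟨m, hm, Or.inl hp⟩
      · exact ⟨m, hm, Or.inr hi⟩
    · rintro ⟨m, hm, hp | hi⟩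
      · exact Or.inl ⟨m, hm, hp⟩
      · exact Or.inr ⟨m, hm, hi⟩

-- ===== VERDICT (by name: the statement is the Claim_ definition above) =====
theorem is_bot_protection_spec : Claim_equal_is_bot_protection := by
  intro html _
  unfold Spec_is_bot_protection is_bot_protection is_bot_protection_alt
  rw [pvBotScan_eq_any_isIn, List.any_map]
  simp [PySem.Str.isIn, Function.comp_def]
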